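-- pv_equiv track=rewrite | github.com/mscheske13/NCAApy | NCAApy/helpers.py | order_players
-- ===== SOURCE A (Python) =====
-- def order_players(players, positions):
--     lineup = []
--     roles = ["G", "F", "C"]
--     for role in roles:
--         for starter in players:
--             if positions[starter] == role:
--                 lineup.append(starter)
--     return lineup
-- ===== SOURCE B (Python) =====
-- def order_players(players, positions):
--     g, f, c = [], [], []
--     for starter in players:
--         p = positions[starter]
--         if p == "G":
--             g.append(starter)
--         elif p == "F":
--             f.append(starter)
--         elif p == "C":
--             c.append(starter)
--     return g + f + c
-- ===== Notes on version B (the rewrite author's own statement) =====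
-- stated objective: faster
-- what changed: Replaces three full scans of players (one per role) with a single pass that buckets each player into one of three role lists, then concatenates g+f+c.
import Mathlib
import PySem

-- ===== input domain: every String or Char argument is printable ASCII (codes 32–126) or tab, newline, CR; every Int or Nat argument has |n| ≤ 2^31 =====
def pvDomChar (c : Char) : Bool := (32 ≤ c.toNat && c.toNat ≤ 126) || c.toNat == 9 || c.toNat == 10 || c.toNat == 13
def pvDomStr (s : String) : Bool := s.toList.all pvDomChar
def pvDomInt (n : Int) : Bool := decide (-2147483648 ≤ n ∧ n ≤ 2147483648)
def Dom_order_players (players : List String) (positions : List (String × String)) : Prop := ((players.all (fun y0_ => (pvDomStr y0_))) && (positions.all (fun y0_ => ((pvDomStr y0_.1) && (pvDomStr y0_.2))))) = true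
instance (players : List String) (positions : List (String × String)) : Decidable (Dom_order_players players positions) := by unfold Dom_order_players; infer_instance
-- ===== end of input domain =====

-- B makes one pass bucketing players into G/F/C lists instead of A's three scans; return value only.
-- ===== PORT A =====
def order_players (players : List String) (positions : List (String × String)) : List String :=
  let d := PySem.Dict.ofList positions
  (["G", "F", "C"]).foldl (fun lineup role =>
    players.foldl (fun l starter =>
      if d.getD starter "" = role then l ++ [starter] else l) lineup) []

-- ===== PORT B =====
def order_players_alt (players : List String) (positions : List (String × String)) : List String :=
  let d := PySem.Dict.ofList positions
  let gfc := players.foldl (fun (acc : List String × List String × List String) starter =>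
      let p := d.getD starter ""
      if p = "G" then (acc.1 ++ [starter], acc.2.1, acc.2.2)
      else if p = "F" then (acc.1, acc.2.1 ++ [starter], acc.2.2)
      else if p = "C" then (acc.1, acc.2.1, acc.2.2 ++ [starter])
      else acc) ([], [], [])
  gfc.1 ++ gfc.2.1 ++ gfc.2.2

-- ===== PRECONDITION & SPEC =====
-- Pre_ excludes exactly the inputs where some player is missing from positions, on which A raises KeyError.
def Pre_order_players (players : List String) (positions : List (String × String)) : Prop :=
  (players.all (fun p => ((PySem.Dict.ofList positions).get? p).isSome)) = true
instance (players : List String) (positions : List (String × String)) : Decidable (Pre_order_players players positions) := by unfold Pre_order_players; infer_instance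
def pvWitness_order_players : List String × (List (String × String)) :=
  (["a", "b", "c"], [("a", "F"), ("b", "G"), ("c", "C")])
def Spec_order_players (players : List String) (positions : List (String × String)) (out : List String) : Prop := out = order_players_alt players positions
instance (players : List String) (positions : List (String × String)) (out : List String) : Decidable (Spec_order_players players positions out) := by unfold Spec_order_players; infer_instance

-- ===== CLAIM (what is proved, stated in full; the proofs are below) =====
def Claim_equal_order_players : Prop := ∀ (players : List String) (positions : List (String × String)), Dom_order_players players positions → Pre_order_players players positions → Spec_order_players players positions (order_players players positions)

-- ===== LEMMAS AND PROOFS =====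

-- B's single-pass fold accumulates exactly the three filters, appended to the incoming buckets.
theorem bucket_fold (players : List String) (d : PySem.Dict String String)
    (g f c : List String) :
    players.foldl (fun (acc : List String × List String × List String) starter =>
      let p := d.getD starter ""
      if p = "G" then (acc.1 ++ [starter], acc.2.1, acc.2.2)
      else if p = "F" then (acc.1, acc.2.1 ++ [starter], acc.2.2)
      else if p = "C" then (acc.1, acc.2.1, acc.2.2 ++ [starter])
      else acc) (g, f, c)
    = (g ++ players.filter (fun s => d.getD s "" = "G"),
       f ++ players.filter (fun s => d.getD s "" = "F"),
       c ++ players.filter (fun s => d.getD s "" = "C")) := by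
  induction players generalizing g f c with
  | nil => simp
  | cons x xs ih =>
    simp only [List.foldl_cons, List.filter_cons]
    by_cases hG : d.getD x "" = "G"
    · simp [hG, ih]
    · by_cases hF : d.getD x "" = "F"
      · simp [hG, hF, ih]
      · by_cases hC : d.getD x "" = "C"
        · simp [hG, hF, hC, ih]
        · simp [hG, hF, hC, ih]

-- ===== VERDICT (by name: the statement is the Claim_ definition above) =====
theorem order_players_spec : Claim_equal_order_players := by
  intro players positions _ _
  unfold Spec_order_players
  simp only [order_players, order_players_alt, bucket_fold, List.foldl_cons, List.foldl_nil,
    PySem.List.foldl_append_ite_eq_filter]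
  simp
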